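-- pv_equiv track=rewrite | github.com/darkjaffs/Project--Battleship-Python- | main.py | user_input
-- ===== SOURCE A (Python) =====
-- def user_input(user_index):
--     input_column_index = 0
--     input_row_index = 0
--
--     list_index = [0 for x in range(2)]
--
--     for x in range(2):
--         ascii_input = user_index[x]
--
--         ASCII_input = ord(ascii_input)
--
--         if ASCII_input >= 65 and ASCII_input <= 90:
--             for y in range(65, ASCII_input):
--                 input_column_index = input_column_index + 1
--
--         elif ASCII_input >= 97 and ASCII_input <= 122:
--             for z in range(97, ASCII_input):
--                 input_column_index = input_column_index + 1
--
--         elif ASCII_input >= 49 and ASCII_input <= 57: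
--             for i in range(49, ASCII_input):
--                 input_row_index = input_row_index + 1
--
--     list_index[0] = int(input_row_index)
--     list_index[1] = int(input_column_index)
--
--     return list_index
-- ===== SOURCE B (Python) =====
-- def user_input(user_index):
--     def col(c):
--         o = ord(c)
--         if 65 <= o <= 90:
--             return o - 65
--         if 97 <= o <= 122:
--             return o - 97
--         return 0
--
--     def row(c):
--         o = ord(c)
--         return o - 49 if 49 <= o <= 57 else 0
--
--     pair = (user_index[0], user_index[1])
--     return [sum(row(c) for c in pair), sum(col(c) for c in pair)]
-- ===== Notes on version B (the rewrite author's own statement) =====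
-- stated objective: simpler
-- what changed: Replaces the counting loops (an outer range(2) loop with inner range(code, ...) increment loops) by per-character closed-form contributions ord(c)-65/97/49 summed over the two characters.
import Mathlib
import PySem

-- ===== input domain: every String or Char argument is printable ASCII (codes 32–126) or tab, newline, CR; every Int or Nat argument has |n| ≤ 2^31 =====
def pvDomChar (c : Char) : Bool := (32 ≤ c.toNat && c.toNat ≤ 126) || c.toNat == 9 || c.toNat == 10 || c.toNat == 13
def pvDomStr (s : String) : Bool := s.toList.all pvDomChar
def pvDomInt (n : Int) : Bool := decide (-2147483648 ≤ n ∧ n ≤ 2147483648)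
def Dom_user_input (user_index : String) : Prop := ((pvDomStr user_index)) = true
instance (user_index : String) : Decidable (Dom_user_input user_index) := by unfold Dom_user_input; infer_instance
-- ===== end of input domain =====

-- B replaces A's inner counting loops by closed-form per-character contributions; objective: simpler.

-- ===== PORT A =====
-- the body of A's 'for x in range(2)' loop; state = (input_column_index, input_row_index)
def pvStepA (user_index : String) (st : Int × Int) (x : Int) : Int × Int :=
  match PySem.Str.pyGet? user_index x with
  | none => st  -- IndexError in Python; excluded by Pre_
  | some c =>
    let a : Int := (c.toNat : Int)
    if 65 ≤ a ∧ a ≤ 90 then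
      ((PySem.List.pyRange 65 a 1).foldl (fun p _ => p + 1) st.1, st.2)
    else if 97 ≤ a ∧ a ≤ 122 then
      ((PySem.List.pyRange 97 a 1).foldl (fun p _ => p + 1) st.1, st.2)
    else if 49 ≤ a ∧ a ≤ 57 then
      (st.1, (PySem.List.pyRange 49 a 1).foldl (fun p _ => p + 1) st.2)
    else st

def user_input (user_index : String) : List Int :=
  let st := (PySem.List.pyRange 0 2 1).foldl (pvStepA user_index) (0, 0)
  [st.2, st.1]

-- ===== PORT B =====
def pvColOf (c : Char) : Int :=
  let o : Int := (c.toNat : Int)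
  if 65 ≤ o ∧ o ≤ 90 then o - 65
  else if 97 ≤ o ∧ o ≤ 122 then o - 97
  else 0

def pvRowOf (c : Char) : Int :=
  let o : Int := (c.toNat : Int)
  if 49 ≤ o ∧ o ≤ 57 then o - 49 else 0

def user_input_alt (user_index : String) : List Int :=
  match PySem.Str.pyGet? user_index 0, PySem.Str.pyGet? user_index 1 with
  | some c0, some c1 => [pvRowOf c0 + pvRowOf c1, pvColOf c0 + pvColOf c1]
  | _, _ => []  -- IndexError in Python; excluded by Pre_

-- ===== PRECONDITION & SPEC =====
-- Pre_ excludes strings of length < 2, on which A (and B) raise IndexError.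
def Pre_user_input (user_index : String) : Prop := 2 ≤ user_index.toList.length
instance (user_index : String) : Decidable (Pre_user_input user_index) := by unfold Pre_user_input; infer_instance
def pvWitness_user_input : String := "A1"

def Spec_user_input (user_index : String) (out : List Int) : Prop := out = user_input_alt user_index
instance (user_index : String) (out : List Int) : Decidable (Spec_user_input user_index out) := by unfold Spec_user_input; infer_instance

-- ===== CLAIM (what is proved, stated in full; the proofs are below) =====
def Claim_equal_user_input : Prop := ∀ (user_index : String), Dom_user_input user_index → Pre_user_input user_index → Spec_user_input user_index (user_input user_index)

-- ===== LEMMAS AND PROOFS =====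

-- counting loop = initial value + list length
theorem pv_foldl_count (l : List Int) (init : Int) :
    l.foldl (fun p _ => p + 1) init = init + l.length := by
  induction l generalizing init with
  | nil => simp
  | cons h t ih => simp [List.foldl, ih]; ring

-- A's loop body adds exactly B's closed-form contributions
theorem pv_stepA_char (s : String) (x : Int) (c : Char) (st : Int × Int)
    (h : PySem.Str.pyGet? s x = some c) :
    pvStepA s st x = (st.1 + pvColOf c, st.2 + pvRowOf c) := by
  unfold pvStepA pvColOf pvRowOf
  rw [h]
  dsimp only
  split_ifs with h1 h2 h3 <;>
    simp [pv_foldl_count, PySem.List.length_pyRange_one] <;> omega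

-- ===== VERDICT (by name: the statement is the Claim_ definition above) =====

theorem user_input_spec : Claim_equal_user_input := by
  intro s _hdom hpre
  unfold Spec_user_input user_input user_input_alt
  have hrange : PySem.List.pyRange 0 2 1 = [0, 1] := by decide
  obtain ⟨c0, h0⟩ : ∃ c, PySem.Str.pyGet? s 0 = some c := by
    simp only [PySem.Str.pyGet?_eq, PySem.Chars.pyGet?_eq_listPyGet?]
    rcases hl : PySem.List.pyGet? s.toList 0 with _ | c
    · exfalso
      rw [PySem.List.pyGet?_eq_none_iff] at hl
      exact hl (by unfold PySem.Raise.InRange Pre_user_input at *; omega)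
    · exact ⟨c, rfl⟩
  obtain ⟨c1, h1⟩ : ∃ c, PySem.Str.pyGet? s 1 = some c := by
    simp only [PySem.Str.pyGet?_eq, PySem.Chars.pyGet?_eq_listPyGet?]
    rcases hl : PySem.List.pyGet? s.toList 1 with _ | c
    · exfalso
      rw [PySem.List.pyGet?_eq_none_iff] at hl
      exact hl (by unfold PySem.Raise.InRange Pre_user_input at *; omega)
    · exact ⟨c, rfl⟩
  rw [hrange]
  simp only [List.foldl, pv_stepA_char s 0 c0 _ h0, pv_stepA_char s 1 c1 _ h1, h0, h1]
  simp
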